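-- pv_equiv track=rewrite | github.com/AndyM84/embermud | embermud/color.py | do_color
-- ===== SOURCE A (Python) =====
-- COLOR_TABLE = {
--     '0': "\033[0m",
--     'k': "\033[0;30m",
--     'K': "\033[1;30m",
--     'r': "\033[0;31m",
--     'R': "\033[1;31m",
--     'g': "\033[0;32m",
--     'G': "\033[1;32m",
--     'y': "\033[0;33m",
--     'Y': "\033[1;33m",
--     'b': "\033[0;34m",
--     'B': "\033[1;34m",
--     'm': "\033[0;35m",
--     'M': "\033[1;35m",
--     'c': "\033[0;36m",
--     'C': "\033[1;36m",
--     'w': "\033[0;37m",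
--     'W': "\033[1;37m",
-- }
--
-- def do_color(text: str, use_ansi: bool) -> str:
--     """Process backtick color codes in text.
--
--     If use_ansi is True, converts codes to ANSI escape sequences.
--     If False, strips the codes entirely.
--     """
--     if not text:
--         return ""
--
--     out = []
--     i = 0
--     while i < len(text):
--         if text[i] != '`':
--             out.append(text[i])
--             i += 1
--             continue
--
--         i += 1
--         if i >= len(text):
--             break
--
--         code = text[i]
--         i += 1
--
--         if not use_ansi:
--             if code == '`':
--                 out.append('`')
--             # Otherwise strip the code
--         else:
--             if code == '`':
--                 out.append('`')
--             elif code in COLOR_TABLE: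
--                 out.append(COLOR_TABLE[code])
--             else:
--                 out.append('`')
--                 out.append(code)
--
--     if use_ansi:
--         out.append("\033[0m")
--
--     return "".join(out)
-- ===== SOURCE B (Python) =====
-- COLOR_TABLE = {
--     '0': "\033[0m",
--     'k': "\033[0;30m",
--     'K': "\033[1;30m",
--     'r': "\033[0;31m",
--     'R': "\033[1;31m",
--     'g': "\033[0;32m",
--     'G': "\033[1;32m",
--     'y': "\033[0;33m",
--     'Y': "\033[1;33m",
--     'b': "\033[0;34m",
--     'B': "\033[1;34m",
--     'm': "\033[0;35m",
--     'M': "\033[1;35m",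
--     'c': "\033[0;36m",
--     'C': "\033[1;36m",
--     'w': "\033[0;37m",
--     'W': "\033[1;37m",
-- }
--
-- def do_color(text: str, use_ansi: bool) -> str:
--     """Split on backticks once, then render each piece's leading char as a code."""
--     if not text:
--         return ""
--
--     parts = text.split('`')
--     out = [parts[0]]
--     i = 1
--     while i < len(parts):
--         p = parts[i]
--         if p == '':
--             # the character after this backtick was another backtick (escaped
--             # '``'), unless this is the trailing piece (lone backtick: dropped)
--             if i + 1 < len(parts):
--                 out.append('`')
--                 out.append(parts[i + 1])
--             i += 2
--         else:
--             if use_ansi: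
--                 out.append(COLOR_TABLE.get(p[0], '`' + p[0]))
--             out.append(p[1:])
--             i += 1
--
--     if use_ansi:
--         out.append("\033[0m")
--
--     return "".join(out)
-- ===== Notes on version B (the rewrite author's own statement) =====
-- stated objective: faster
-- what changed: Replaced the index-based while-loop state machine over single characters with a two-phase approach: split the text on backticks once, then emit each piece's leading character as a color code (an empty piece meaning an escaped backtick), concatenating whole pieces instead of appending one character at a time.
import Mathlib
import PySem

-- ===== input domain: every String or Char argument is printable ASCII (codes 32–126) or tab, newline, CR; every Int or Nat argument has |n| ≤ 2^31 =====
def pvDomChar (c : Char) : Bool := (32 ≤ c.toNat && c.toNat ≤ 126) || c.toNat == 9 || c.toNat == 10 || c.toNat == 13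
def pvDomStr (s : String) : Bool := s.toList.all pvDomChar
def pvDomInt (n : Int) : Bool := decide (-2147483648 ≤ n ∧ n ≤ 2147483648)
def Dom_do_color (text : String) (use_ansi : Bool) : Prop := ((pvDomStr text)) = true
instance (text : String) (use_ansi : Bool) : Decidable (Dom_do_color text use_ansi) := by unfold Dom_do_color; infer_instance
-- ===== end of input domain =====

-- B replaces A's character-by-character while-loop state machine by one split on
-- backticks followed by a per-piece rendering pass (objective: faster by a constant
-- factor — work per piece instead of per character; measured).

-- ===== PORT A =====
def COLOR_TABLE : PySem.Dict Char String :=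
  PySem.Dict.ofList
  [('0', "\x1b[0m"),
   ('k', "\x1b[0;30m"), ('K', "\x1b[1;30m"),
   ('r', "\x1b[0;31m"), ('R', "\x1b[1;31m"),
   ('g', "\x1b[0;32m"), ('G', "\x1b[1;32m"),
   ('y', "\x1b[0;33m"), ('Y', "\x1b[1;33m"),
   ('b', "\x1b[0;34m"), ('B', "\x1b[1;34m"),
   ('m', "\x1b[0;35m"), ('M', "\x1b[1;35m"),
   ('c', "\x1b[0;36m"), ('C', "\x1b[1;36m"),
   ('w', "\x1b[0;37m"), ('W', "\x1b[1;37m")]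

-- A's while-loop over the characters, with its `out` list of strings as accumulator.
def doColorLoopA (ua : Bool) : List Char → List String → List String
  | [], out => out
  | c :: rest, out =>
    if c ≠ '`' then doColorLoopA ua rest (out ++ [String.ofList [c]])
    else
      match rest with
      | [] => out        -- i >= len(text): break
      | code :: rest' =>
        if ua = false then
          if code = '`' then doColorLoopA ua rest' (out ++ ["`"])
          else doColorLoopA ua rest' out
        else
          if code = '`' then doColorLoopA ua rest' (out ++ ["`"])
          else
            match PySem.Dict.get? COLOR_TABLE code with
            | some v => doColorLoopA ua rest' (out ++ [v])
            | none => doColorLoopA ua rest' (out ++ ["`", String.ofList [code]])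

def do_color (text : String) (use_ansi : Bool) : String :=
  if text = "" then ""
  else
    let out := doColorLoopA use_ansi text.toList []
    let out := if use_ansi then out ++ ["\x1b[0m"] else out
    PySem.Str.join "" out

-- ===== PORT B =====
-- B's while-loop over parts[1:]: an empty piece means the code was a backtick
-- (the following piece is then literal text); otherwise the piece's first
-- character is the code and the remainder is literal text.
def doColorTailB (ua : Bool) : List String → List String
  | [] => []
  | p :: ps =>
    match p.toList with
    | [] =>
      match ps with
      | [] => []                   -- trailing lone backtick: dropped
      | q :: ps' => "`" :: q :: doColorTailB ua ps'
    | code :: rest =>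
      (if ua then [PySem.Dict.getD COLOR_TABLE code (String.ofList ['`', code])] else [])
        ++ String.ofList rest :: doColorTailB ua ps

def do_color_alt (text : String) (use_ansi : Bool) : String :=
  if text = "" then ""
  else
    match PySem.Str.split? text "`" with
    | none | some [] => ""         -- unreachable: split on "`" always returns a nonempty list
    | some (p0 :: parts) =>
      let out := p0 :: doColorTailB use_ansi parts
      let out := if use_ansi then out ++ ["\x1b[0m"] else out
      PySem.Str.join "" out

-- ===== PRECONDITION & SPEC =====
def Spec_do_color (text : String) (use_ansi : Bool) (out : String) : Prop := out = do_color_alt text use_ansi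
instance (text : String) (use_ansi : Bool) (out : String) : Decidable (Spec_do_color text use_ansi out) := by unfold Spec_do_color; infer_instance

-- ===== CLAIM (what is proved, stated in full; the proofs are below) =====
def Claim_equal_do_color : Prop := ∀ (text : String) (use_ansi : Bool), Dom_do_color text use_ansi → Spec_do_color text use_ansi (do_color text use_ansi)

-- ===== LEMMAS AND PROOFS =====

-- flattened character content of an `out` list
def pvFlat (out : List String) : List Char := (out.map String.toList).flatten

-- split on '`' without fuel or accumulators
def pvSplitTicks : List Char → List (List Char)
  | [] => [[]]
  | c :: rest =>
    if c = '`' then [] :: pvSplitTicks rest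
    else
      match pvSplitTicks rest with
      | p :: ps => (c :: p) :: ps
      | [] => [[c]]

-- what A's loop emits for one code character
def pvEmit (ua : Bool) (code : Char) : List Char :=
  if ua = false then (if code = '`' then ['`'] else [])
  else if code = '`' then ['`']
  else
    match PySem.Dict.get? COLOR_TABLE code with
    | some v => v.toList
    | none => '`' :: [code]

-- pure character output of A's loop
def pvJoinA (ua : Bool) : List Char → List Char
  | [] => []
  | c :: rest =>
    if c = '`' then
      match rest with
      | [] => []
      | code :: rest' => pvEmit ua code ++ pvJoinA ua rest'
    else c :: pvJoinA ua rest

-- pure character output of B's tail loop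
def pvProcTail (ua : Bool) : List (List Char) → List Char
  | [] => []
  | p :: ps =>
    match p with
    | [] =>
      match ps with
      | [] => []
      | q :: ps' => '`' :: (q ++ pvProcTail ua ps')
    | code :: rest =>
      (if ua then (PySem.Dict.getD COLOR_TABLE code (String.ofList ['`', code])).toList else [])
        ++ rest ++ pvProcTail ua ps

lemma pvSplitTicks_ne_nil (l : List Char) : pvSplitTicks l ≠ [] := by
  cases l with
  | nil => simp [pvSplitTicks]
  | cons c rest =>
    simp only [pvSplitTicks]
    split
    · simp
    · split <;> simp

lemma pvSplitOn_go_single (fuel : Nat) :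
    ∀ (l cur : List Char) (acc : List (List Char)), l.length ≤ fuel →
      PySem.Chars.splitOn.go ['`'] fuel l cur acc
        = acc.reverse ++ (pvSplitTicks l).modifyHead (cur.reverse ++ ·) := by
  induction fuel with
  | zero =>
    intro l cur acc h
    have hl : l = [] := List.eq_nil_of_length_eq_zero (Nat.le_zero.mp h)
    subst hl
    simp [PySem.Chars.splitOn.go, pvSplitTicks]
  | succ n ih =>
    intro l cur acc h
    cases l with
    | nil => simp [PySem.Chars.splitOn.go, pvSplitTicks]
    | cons c rest =>
      by_cases hc : c = '`'
      · subst hc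
        have hpre : List.isPrefixOf ['`'] ('`' :: rest) = true := by
          simp [List.isPrefixOf]
        rw [PySem.Chars.splitOn.go]
        simp only [hpre, if_true, List.length_cons, List.length_nil, Nat.zero_add,
          List.drop_succ_cons, List.drop_zero]
        rw [ih rest [] (cur.reverse :: acc) (Nat.le_of_succ_le_succ h)]
        rw [show pvSplitTicks ('`' :: rest) = [] :: pvSplitTicks rest from by simp [pvSplitTicks]]
        cases pvSplitTicks rest <;> simp
      · have hpre : List.isPrefixOf ['`'] (c :: rest) = false := by
          simp only [List.isPrefixOf_cons₂ ] <;> simp [List.isPrefixOf]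
          · intro h'; exact absurd h'.symm hc
        rw [PySem.Chars.splitOn.go]
        simp only [hpre, Bool.false_eq_true, if_false]
        rw [ih rest (c :: cur) acc (Nat.le_of_succ_le_succ h)]
        congr 1
        simp only [pvSplitTicks, hc, if_false]
        rcases hp : pvSplitTicks rest with _ | ⟨p, ps⟩
        · exact absurd hp (pvSplitTicks_ne_nil rest)
        · simp

lemma pvSplitOn_single (l : List Char) :
    PySem.Chars.splitOn l ['`'] = pvSplitTicks l := by
  rw [PySem.Chars.splitOn, pvSplitOn_go_single (l.length + 1) l [] [] (Nat.le_succ _)]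
  rcases hp : pvSplitTicks l with _ | ⟨p, ps⟩
  · exact absurd hp (pvSplitTicks_ne_nil l)
  · simp

-- unfolding lemmas for the nested matches
lemma pvJoinA_cons_ne (ua : Bool) (c : Char) (rest : List Char) (h : c ≠ '`') :
    pvJoinA ua (c :: rest) = c :: pvJoinA ua rest := by
  cases rest <;> simp [pvJoinA, h]

lemma pvJoinA_tick_nil (ua : Bool) : pvJoinA ua ['`'] = [] := by simp [pvJoinA]

lemma pvJoinA_tick_cons (ua : Bool) (code : Char) (rest : List Char) :
    pvJoinA ua ('`' :: code :: rest) = pvEmit ua code ++ pvJoinA ua rest := by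
  simp [pvJoinA]

lemma pvProcTail_empty_nil (ua : Bool) : pvProcTail ua [[]] = [] := by simp [pvProcTail]

lemma pvProcTail_empty_cons (ua : Bool) (q : List Char) (ps' : List (List Char)) :
    pvProcTail ua ([] :: q :: ps') = '`' :: (q ++ pvProcTail ua ps') := by
  simp [pvProcTail]

lemma pvProcTail_cons (ua : Bool) (code : Char) (rest : List Char) (ps : List (List Char)) :
    pvProcTail ua ((code :: rest) :: ps)
      = (if ua then (PySem.Dict.getD COLOR_TABLE code (String.ofList ['`', code])).toList else [])
          ++ rest ++ pvProcTail ua ps := by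
  cases ps <;> simp [pvProcTail]

lemma pvEmit_eq_getD (code : Char) (h : code ≠ '`') :
    pvEmit true code = (PySem.Dict.getD COLOR_TABLE code (String.ofList ['`', code])).toList := by
  rcases hg : PySem.Dict.get? COLOR_TABLE code with _ | v <;>
    simp [pvEmit, h, PySem.Dict.getD, hg]

-- the mutual invariant: B's piece-wise pass reproduces A's state machine
lemma pvMN (ua : Bool) (l : List Char) :
    (match pvSplitTicks l with
     | [] => []
     | p :: ps => p ++ pvProcTail ua ps) = pvJoinA ua l
    ∧ pvProcTail ua (pvSplitTicks l) = pvJoinA ua ('`' :: l) := by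
  induction l with
  | nil =>
    constructor
    · simp [pvSplitTicks, pvProcTail, pvJoinA]
    · simp [pvSplitTicks, pvProcTail_empty_nil, pvJoinA_tick_nil]
  | cons c rest ih =>
    obtain ⟨ihM, ihN⟩ := ih
    constructor
    · by_cases hc : c = '`'
      · subst hc
        rw [show pvSplitTicks ('`' :: rest) = [] :: pvSplitTicks rest from by simp [pvSplitTicks]]
        rcases hp : pvSplitTicks rest with _ | ⟨q, ps'⟩
        · exact absurd hp (pvSplitTicks_ne_nil rest)
        · rw [hp] at ihN
          simpa using ihN
      · simp only [pvSplitTicks, hc, if_false]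
        rcases hp : pvSplitTicks rest with _ | ⟨p, ps⟩
        · exact absurd hp (pvSplitTicks_ne_nil rest)
        · rw [hp] at ihM
          rw [pvJoinA_cons_ne ua c rest hc]
          simpa using ihM
    · by_cases hc : c = '`'
      · subst hc
        rw [show pvSplitTicks ('`' :: rest) = [] :: pvSplitTicks rest from by simp [pvSplitTicks]]
        rcases hp : pvSplitTicks rest with _ | ⟨q, ps'⟩
        · exact absurd hp (pvSplitTicks_ne_nil rest)
        · rw [hp] at ihM
          rw [pvProcTail_empty_cons, pvJoinA_tick_cons]
          simp only [pvEmit, if_pos rfl, List.singleton_append]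
          congr 1
          simpa using ihM
      · simp only [pvSplitTicks, hc, if_false]
        rcases hp : pvSplitTicks rest with _ | ⟨p, ps⟩
        · exact absurd hp (pvSplitTicks_ne_nil rest)
        · rw [hp] at ihM
          rw [pvJoinA_tick_cons]
          cases ua with
          | false =>
            rw [pvProcTail_cons]
            have he : pvEmit false c = [] := by simp [pvEmit, hc]
            rw [he]
            simpa using ihM
          | true =>
            rw [pvProcTail_cons, pvEmit_eq_getD c hc]
            simp only [if_true, List.append_assoc]
            exact congrArg _ (by simpa using ihM)

lemma pvFlat_loopA (ua : Bool) : ∀ (l : List Char) (out : List String),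
    pvFlat (doColorLoopA ua l out) = pvFlat out ++ pvJoinA ua l
  | [], out => by simp [doColorLoopA, pvJoinA]
  | [c], out => by
    by_cases hc : c = '`'
    · subst hc
      simp [doColorLoopA, pvJoinA_tick_nil]
    · rw [pvJoinA_cons_ne ua c [] hc]
      simp [doColorLoopA, hc, pvFlat, pvJoinA]
  | c :: code :: rest, out => by
    have hrA : ∀ o, (List.map String.toList (doColorLoopA ua rest o)).flatten
        = (List.map String.toList o).flatten ++ pvJoinA ua rest :=
      fun o => by simpa [pvFlat] using pvFlat_loopA ua rest o
    have hrB : ∀ o, (List.map String.toList (doColorLoopA ua (code :: rest) o)).flatten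
        = (List.map String.toList o).flatten ++ pvJoinA ua (code :: rest) :=
      fun o => by simpa [pvFlat] using pvFlat_loopA ua (code :: rest) o
    by_cases hc : c = '`'
    · subst hc
      rw [pvJoinA_tick_cons]
      by_cases hcd : code = '`'
      · subst hcd
        cases ua <;> simp [doColorLoopA, hrA, pvFlat, pvEmit]
      · rcases hg : PySem.Dict.get? COLOR_TABLE code with _ | v <;>
          cases ua <;> simp [doColorLoopA, hrA, pvFlat, pvEmit, hcd, hg]
    · rw [pvJoinA_cons_ne ua c _ hc]
      simp [doColorLoopA, hc, hrB, pvFlat]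
termination_by l out => l.length
decreasing_by all_goals simp <;> omega

lemma pvFlat_tailB (ua : Bool) : ∀ (ps : List (List Char)),
    pvFlat (doColorTailB ua (ps.map String.ofList)) = pvProcTail ua ps
  | [] => by simp [doColorTailB, pvProcTail, pvFlat]
  | [] :: ps => by
    cases ps with
    | nil => simp [doColorTailB, pvProcTail, pvFlat]
    | cons q ps' =>
      have ih := pvFlat_tailB ua ps'
      rw [pvProcTail_empty_cons]
      simp only [List.map_cons, doColorTailB, String.toList_ofList]
      simp only [pvFlat, List.map_cons, List.flatten_cons, String.toList_ofList] at ih ⊢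
      rw [ih]
      simp
  | (code :: rest) :: ps => by
    have ih := pvFlat_tailB ua ps
    rw [pvProcTail_cons]
    simp only [List.map_cons]
    rw [show doColorTailB ua (String.ofList (code :: rest) :: List.map String.ofList ps)
        = (if ua then [PySem.Dict.getD COLOR_TABLE code (String.ofList ['`', code])] else [])
            ++ String.ofList rest :: doColorTailB ua (List.map String.ofList ps) from by
      cases ps <;> simp [doColorTailB]]
    cases ua with
    | false =>
      simp only [Bool.false_eq_true, if_false]
      simp only [pvFlat, List.map_cons, List.flatten_cons, List.map_nil, List.nil_append,
        String.toList_ofList] at ih ⊢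
      rw [ih]
    | true =>
      simp only [if_true]
      simp only [pvFlat, List.map_cons, List.map_append, List.flatten_append, List.flatten_cons,
        String.toList_ofList] at ih ⊢
      rw [ih]
      simp

lemma pvIntersperse_nil_flatten (ps : List (List Char)) :
    (List.intersperse ([] : List Char) ps).flatten = ps.flatten := by
  induction ps with
  | nil => simp
  | cons a t ih =>
    cases t with
    | nil => simp
    | cons b t' => simp_all [List.intersperse]

lemma pvJoin_empty_sep (out : List String) :
    PySem.Str.join "" out = String.ofList (pvFlat out) := by
  simp only [PySem.Str.join, PySem.Chars.join]
  congr 1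
  simp only [List.intercalate, pvFlat]
  have : ("" : String).toList = [] := by decide
  rw [this]
  exact pvIntersperse_nil_flatten _

-- ===== VERDICT (by name: the statement is the Claim_ definition above) =====
theorem do_color_spec : Claim_equal_do_color := by
  unfold Claim_equal_do_color Spec_do_color
  intro text ua _
  by_cases ht : text = ""
  · simp [do_color, do_color_alt, ht]
  · simp only [do_color, do_color_alt, if_neg ht]
    have hsplit : PySem.Str.split? text "`" = some ((pvSplitTicks text.toList).map String.ofList) := by
      have hsep : ("`" : String).toList = ['`'] := by decide
      simp [PySem.Str.split?, PySem.Chars.split?, hsep, pvSplitOn_single]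
    rw [hsplit]
    rcases hp : pvSplitTicks text.toList with _ | ⟨p0, parts⟩
    · exact absurd hp (pvSplitTicks_ne_nil _)
    · simp only [List.map_cons]
      have hmn := (pvMN ua text.toList).1
      rw [hp] at hmn
      simp only at hmn
      cases ua with
      | false =>
        simp only [Bool.false_eq_true, if_false]
        rw [pvJoin_empty_sep, pvJoin_empty_sep]
        congr 1
        rw [pvFlat_loopA false text.toList []]
        simp only [pvFlat, List.map_nil, List.flatten_nil, List.nil_append, List.map_cons,
          List.flatten_cons, String.toList_ofList]
        have hB := pvFlat_tailB false parts
        simp only [pvFlat] at hB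
        rw [hB]
        exact hmn.symm
      | true =>
        simp only [eq_self_iff_true, if_true, ite_true]
        rw [pvJoin_empty_sep, pvJoin_empty_sep]
        congr 1
        simp only [pvFlat, List.map_append, List.flatten_append, List.map_cons, List.flatten_cons]
        have hA := pvFlat_loopA true text.toList []
        simp only [pvFlat, List.map_nil, List.flatten_nil, List.nil_append] at hA
        rw [hA]
        have hB := pvFlat_tailB true parts
        simp only [pvFlat] at hB
        rw [hB]
        simp only [String.toList_ofList]
        rw [hmn]
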